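-- pv_equiv track=rewrite | github.com/lsh424/algorithm | Hash/best_album.py | solution
-- ===== SOURCE A (Python) =====
-- import collections
--
-- def solution(genres, plays):
--     answer = []
--     dic = collections.defaultdict(list)
--
--     for i in range(len(genres)):
--         if not dic[genres[i]]:
--             dic[genres[i]].append(0)
--             dic[genres[i]].append((i,plays[i]))
--         else:
--             dic[genres[i]].append((i,plays[i]))
--
--         dic[genres[i]][0] += plays[i]
--
--     ls = sorted(dic.items(), key = lambda x: x[1][0], reverse = True)
--
--     for i in ls:
--         t = sorted(i[1][1:], key = lambda x: (x[1], -x[0]), reverse = True)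
--         answer.append(t[0][0])
--         try:
--             answer.append(t[1][0])
--         except:
--             pass
--
--     return answer
-- ===== SOURCE B (Python) =====
-- def solution(genres, plays):
--     n = len(genres)
--     total = {}
--     first = {}
--     for i in range(n):
--         g = genres[i]
--         if g not in total:
--             total[g] = 0
--             first[g] = i
--         total[g] += plays[i]
--     order = sorted(range(n), key=lambda i: (-total[genres[i]], first[genres[i]], -plays[i], i))
--     answer = []
--     cnt = {}
--     for i in order:
--         g = genres[i]
--         c = cnt.get(g, 0)
--         if c < 2:
--             answer.append(i)
--             cnt[g] = c + 1
--     return answer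
-- ===== Notes on version B (the rewrite author's own statement) =====
-- stated objective: alternative
-- what changed: B replaces A's per-genre dict of entry lists with two nested sorts by a single global sort of all track indices on the composite key (-genre_total, genre_first_index, -plays, index) followed by one counting pass that keeps at most two tracks per genre.
import Mathlib
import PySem

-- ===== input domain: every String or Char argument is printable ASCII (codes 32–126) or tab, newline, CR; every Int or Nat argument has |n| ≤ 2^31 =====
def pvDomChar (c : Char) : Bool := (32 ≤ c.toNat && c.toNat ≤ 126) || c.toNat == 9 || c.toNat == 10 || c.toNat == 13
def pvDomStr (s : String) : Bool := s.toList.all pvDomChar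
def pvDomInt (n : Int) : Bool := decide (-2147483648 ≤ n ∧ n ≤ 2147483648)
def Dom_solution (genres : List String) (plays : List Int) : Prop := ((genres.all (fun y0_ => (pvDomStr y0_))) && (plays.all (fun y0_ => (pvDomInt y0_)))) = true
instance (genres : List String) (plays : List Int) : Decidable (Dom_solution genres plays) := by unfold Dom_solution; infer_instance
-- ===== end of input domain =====

-- B replaces A's per-genre sorts by one global sort on a composite key plus a counting pass (alternative decomposition).

-- ===== PORT A =====
-- Python stores [total, (i,plays_i), …] in one heterogeneous list; ported as the pair (total, entries).
-- loop body: the 'if not dic[genres[i]]' branch (first access) and the common 'dic[genres[i]][0] += plays[i]'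
def aStep (genres : List String) (plays : List Int)
    (d : PySem.Dict String (Int × List (Int × Int))) (i : Int) :
    PySem.Dict String (Int × List (Int × Int)) :=
  let g := PySem.List.pyGetD genres i ""
  let p := PySem.List.pyGetD plays i 0
  let cur : Int × List (Int × Int) :=
    if d.contains g = false then (0, [] ++ [(i, p)])
    else (let c := d.getD g (0, []); (c.1, c.2 ++ [(i, p)]))
  d.insert g (cur.1 + p, cur.2)

-- answer.append(t[0][0]); try: answer.append(t[1][0]) except: pass — t is nonempty whenever this runs
-- the Python tuple key (x[1], -x[0]) is ported as a two-element List Int: same lexicographic order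
def aPick (answer : List Int) (e : String × Int × List (Int × Int)) : List Int :=
  let t := PySem.List.sorted e.2.2 (fun x => [x.2, -x.1]) true
  match t with
  | [] => answer
  | [a] => answer ++ [a.1]
  | a :: b :: _ => answer ++ [a.1, b.1]

def solution (genres : List String) (plays : List Int) : List Int :=
  let dic := (PySem.List.pyRange 0 (PySem.List.len genres)).foldl (aStep genres plays) PySem.Dict.empty
  let ls := PySem.List.sorted dic.items (fun x => x.2.1) true
  ls.foldl aPick []

-- ===== PORT B =====
-- first pass of Source B: total[g] += plays[i], first[g] = first index of g
def bStep (genres : List String) (plays : List Int)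
    (tf : PySem.Dict String Int × PySem.Dict String Int) (i : Int) :
    PySem.Dict String Int × PySem.Dict String Int :=
  let g := PySem.List.pyGetD genres i ""
  let tf := if tf.1.contains g = false then (tf.1.insert g 0, tf.2.insert g i) else tf
  (tf.1.insert g (tf.1.getD g 0 + PySem.List.pyGetD plays i 0), tf.2)

-- the composite tuple key (-total[genres[i]], first[genres[i]], -plays[i], i),
-- ported as a four-element List Int: same lexicographic order as the Python tuple
def bKey (genres : List String) (plays : List Int)
    (total first : PySem.Dict String Int) (i : Int) : List Int :=
  let g := PySem.List.pyGetD genres i ""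
  [-(total.getD g 0), first.getD g 0, -(PySem.List.pyGetD plays i 0), i]

-- counting pass of Source B
def bCount (genres : List String) (ac : List Int × PySem.Dict String Int) (i : Int) :
    List Int × PySem.Dict String Int :=
  let g := PySem.List.pyGetD genres i ""
  let c := ac.2.getD g 0
  if c < 2 then (ac.1 ++ [i], ac.2.insert g (c + 1)) else ac

def solution_alt (genres : List String) (plays : List Int) : List Int :=
  let n := PySem.List.len genres
  let tf := (PySem.List.pyRange 0 n).foldl (bStep genres plays) (PySem.Dict.empty, PySem.Dict.empty)
  let order := PySem.List.sorted (PySem.List.pyRange 0 n) (bKey genres plays tf.1 tf.2) false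
  (order.foldl (bCount genres) ([], PySem.Dict.empty)).1

-- ===== PRECONDITION & SPEC =====
-- Pre_ excludes exactly the inputs where Python A raises IndexError: plays shorter than genres.
def Pre_solution (genres : List String) (plays : List Int) : Prop := genres.length ≤ plays.length
instance (genres : List String) (plays : List Int) : Decidable (Pre_solution genres plays) := by unfold Pre_solution; infer_instance
def pvWitness_solution : List String × List Int := (["a", "a", "b"], [5, 6, 7])
def Spec_solution (genres : List String) (plays : List Int) (out : List Int) : Prop := out = solution_alt genres plays
instance (genres : List String) (plays : List Int) (out : List Int) : Decidable (Spec_solution genres plays out) := by unfold Spec_solution; infer_instance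

-- ===== CLAIM (what is proved, stated in full; the proofs are below) =====
def Claim_equal_solution : Prop := ∀ (genres : List String) (plays : List Int), Dom_solution genres plays → Pre_solution genres plays → Spec_solution genres plays (solution genres plays)

-- ===== LEMMAS AND PROOFS =====

-- canonical per-genre data, over Nat indices
def selN (genres : List String) (g : String) : List Nat :=
  (List.range genres.length).filter (fun j => genres.getD j "" == g)
def Tg (genres : List String) (plays : List Int) (g : String) : Int :=
  ((selN genres g).map (fun j => plays.getD j 0)).sum
def Fg (genres : List String) (g : String) : Int :=
  ((selN genres g).map (fun (j : Nat) => (j : Int))).headD 0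
def Eg (genres : List String) (plays : List Int) (g : String) : List (Int × Int) :=
  (selN genres g).map (fun (j : Nat) => ((j : Int), plays.getD j 0))

-- STABILITY of PySem's reverse insertion sort: ties keep any order the input was pairwise in.
theorem insertBy_stable_pairwise {α κ : Type} [LinearOrder κ] (key : α → κ) (R : α → α → Prop)
    (x : α) (acc : List α)
    (hacc : acc.Pairwise (fun a b => key b < key a ∨ (key a = key b ∧ R a b)))
    (hR : ∀ a ∈ acc, R a x) :
    (PySem.List.insertBy (fun a b => decide (key b < key a)) x acc).Pairwise
      (fun a b => key b < key a ∨ (key a = key b ∧ R a b)) := by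
  induction acc with
  | nil => simp [PySem.List.insertBy]
  | cons y ys ih =>
    rw [List.pairwise_cons] at hacc
    obtain ⟨hy, hys⟩ := hacc
    by_cases hlt : key y < key x
    · rw [show PySem.List.insertBy (fun a b => decide (key b < key a)) x (y :: ys)
          = x :: y :: ys by simp [PySem.List.insertBy, hlt]]
      refine List.Pairwise.cons ?_ (List.Pairwise.cons hy hys)
      intro z hz
      rcases List.mem_cons.mp hz with hz | hz
      · subst hz; exact Or.inl hlt
      · left
        rcases hy z hz with h | ⟨h, _⟩
        · exact lt_trans h hlt
        · exact h ▸ hlt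
    · rw [show PySem.List.insertBy (fun a b => decide (key b < key a)) x (y :: ys)
          = y :: PySem.List.insertBy (fun a b => decide (key b < key a)) x ys by
            simp [PySem.List.insertBy, hlt]]
      refine List.Pairwise.cons ?_ (ih hys (fun a ha => hR a (List.mem_cons_of_mem _ ha)))
      intro z hz
      rw [PySem.List.mem_insertBy] at hz
      rcases hz with hz | hz
      · subst hz
        rcases lt_or_eq_of_le (not_lt.mp hlt) with h | h
        · exact Or.inl h
        · exact Or.inr ⟨h.symm, hR y (List.mem_cons_self)⟩
      · exact hy z hz

theorem foldl_insertBy_stable_pairwise {α κ : Type} [LinearOrder κ] (key : α → κ)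
    (R : α → α → Prop) :
    ∀ (xs acc : List α),
    acc.Pairwise (fun a b => key b < key a ∨ (key a = key b ∧ R a b)) →
    (∀ a ∈ acc, ∀ b ∈ xs, R a b) → xs.Pairwise R →
    (xs.foldl (fun acc x => PySem.List.insertBy (fun a b => decide (key b < key a)) x acc) acc).Pairwise
      (fun a b => key b < key a ∨ (key a = key b ∧ R a b)) := by
  intro xs
  induction xs with
  | nil => intro acc h _ _; simpa using h
  | cons x xs ih =>
    intro acc hacc hcross hxs
    rw [List.pairwise_cons] at hxs
    obtain ⟨hx, hxs⟩ := hxs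
    simp only [List.foldl_cons]
    refine ih _ (insertBy_stable_pairwise key R x acc hacc
      (fun a ha => hcross a ha x List.mem_cons_self)) ?_ hxs
    intro a ha b hb
    rw [PySem.List.mem_insertBy] at ha
    rcases ha with ha | ha
    · subst ha; exact hx b hb
    · exact hcross a ha b (List.mem_cons_of_mem _ hb)

theorem sorted_rev_stable_pairwise {α κ : Type} [LinearOrder κ] (xs : List α) (key : α → κ)
    (R : α → α → Prop) (hxs : xs.Pairwise R) :
    (PySem.List.sorted xs key true).Pairwise
      (fun a b => key b < key a ∨ (key a = key b ∧ R a b)) := by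
  rw [PySem.List.sorted_rev_eq_foldl_insertBy]
  exact foldl_insertBy_stable_pairwise key R xs [] (by simp) (by simp) hxs

theorem aStep_eq (genres : List String) (plays : List Int)
    (d : PySem.Dict String (Int × List (Int × Int))) (i : Int) :
    aStep genres plays d i =
      d.insert (PySem.List.pyGetD genres i "")
        ((d.getD (PySem.List.pyGetD genres i "") (0, [])).1 + PySem.List.pyGetD plays i 0,
         (d.getD (PySem.List.pyGetD genres i "") (0, [])).2 ++ [(i, PySem.List.pyGetD plays i 0)]) := by
  unfold aStep
  by_cases h : d.contains (PySem.List.pyGetD genres i "") = false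
  · simp [h, PySem.Dict.getD_of_not_contains _ _ h]
  · simp [h]

theorem pyRange_filter_eq (genres : List String) (g : String) :
    (PySem.List.pyRange 0 (PySem.List.len genres)).filter
        (fun i => PySem.List.pyGetD genres i "" == g)
      = (selN genres g).map (fun (j : Nat) => (j : Int)) := by
  rw [show PySem.List.len genres = ((genres.length : Nat) : Int) by simp [PySem.List.len]]
  rw [PySem.List.pyRange_zero_nat, List.filter_map]
  simp only [selN, Function.comp_def, PySem.List.pyGetD_natCast]

-- A's dict: lookups
theorem aFold_getD (genres : List String) (plays : List Int) :
    ∀ (L : List Int) (d : PySem.Dict String (Int × List (Int × Int))) (g : String),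
    (L.foldl (aStep genres plays) d).getD g (0, []) =
      ((d.getD g (0, [])).1 + ((L.filter (fun i => PySem.List.pyGetD genres i "" == g)).map
          (fun i => PySem.List.pyGetD plays i 0)).sum,
       (d.getD g (0, [])).2 ++ (L.filter (fun i => PySem.List.pyGetD genres i "" == g)).map
          (fun i => (i, PySem.List.pyGetD plays i 0))) := by
  intro L
  induction L with
  | nil => intro d g; simp
  | cons i L ih =>
    intro d g
    rw [List.foldl_cons, aStep_eq, ih, List.filter_cons]
    by_cases hg : PySem.List.pyGetD genres i "" = g
    · rw [hg]
      simp [PySem.Dict.getD_insert, add_assoc]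
    · have hg' : (PySem.List.pyGetD genres i "" == g) = false := by
        simpa using hg
      rw [hg']
      simp [PySem.Dict.getD_insert, Ne.symm hg]

theorem aFold_items (genres : List String) (plays : List Int) :
    ((PySem.List.pyRange 0 (PySem.List.len genres)).foldl (aStep genres plays) PySem.Dict.empty).items
      = (PySem.List.dedup genres).map (fun g => (g, Tg genres plays g, Eg genres plays g)) := by
  have hstep : aStep genres plays = (fun d i =>
      d.insert (PySem.List.pyGetD genres i "")
        ((d.getD (PySem.List.pyGetD genres i "") (0, [])).1 + PySem.List.pyGetD plays i 0,
         (d.getD (PySem.List.pyGetD genres i "") (0, [])).2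
           ++ [(i, PySem.List.pyGetD plays i 0)])) :=
    funext fun d => funext fun i => aStep_eq genres plays d i
  have hnodup : ((PySem.List.pyRange 0 (PySem.List.len genres)).foldl
      (aStep genres plays) PySem.Dict.empty).keys.Nodup := by
    rw [hstep]
    exact PySem.Dict.nodup_keys_foldl_insert_key _ _ _ _ PySem.Dict.nodup_keys_empty
  have hkeys : ((PySem.List.pyRange 0 (PySem.List.len genres)).foldl
      (aStep genres plays) PySem.Dict.empty).keys = PySem.List.dedup genres := by
    have hmapg : (PySem.List.pyRange 0 (PySem.List.len genres)).map
        (fun i => PySem.List.pyGetD genres i "") = genres :=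
      PySem.List.map_pyGetD_pyRange_zero genres ""
    rw [hstep, PySem.Dict.keys_foldl_insert_key, hmapg]
    simp [PySem.Dict.keys_empty, PySem.Set.update_nil_left]
  rw [PySem.Dict.items_eq_map_keys _ hnodup (0, []), hkeys]
  refine List.map_congr_left ?_
  intro g _
  rw [aFold_getD genres plays _ PySem.Dict.empty g]
  simp only [PySem.Dict.getD_empty, pyRange_filter_eq, List.map_map]
  refine congrArg (fun x => (g, x)) ?_
  refine Prod.ext ?_ ?_
  · simp only [Tg, List.map_map, Function.comp_def, PySem.List.pyGetD_natCast]
    simp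
  · simp only [Eg, List.map_map, Function.comp_def, PySem.List.pyGetD_natCast]
    simp

-- B's first pass
theorem bFold_char (genres : List String) (plays : List Int) :
    ∀ (L : List Int) (dt df : PySem.Dict String Int) (g : String),
    ((L.foldl (bStep genres plays) (dt, df)).1.getD g 0 =
       dt.getD g 0 + ((L.filter (fun i => PySem.List.pyGetD genres i "" == g)).map
         (fun i => PySem.List.pyGetD plays i 0)).sum)
    ∧ ((L.foldl (bStep genres plays) (dt, df)).2.getD g 0 =
       if dt.contains g then df.getD g 0
       else (L.filter (fun i => PySem.List.pyGetD genres i "" == g)).headD (df.getD g 0)) := by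
  intro L
  induction L with
  | nil => intro dt df g; simp
  | cons i L ih =>
    intro dt df g
    rw [List.foldl_cons]
    simp only [bStep]
    by_cases hc : dt.contains (PySem.List.pyGetD genres i "") = false
    · simp only [hc, if_true]
      by_cases hg : PySem.List.pyGetD genres i "" = g
      · refine ⟨?_, ?_⟩
        · rw [(ih _ _ g).1]
          simp [List.filter_cons, hg, PySem.Dict.getD_insert,
            PySem.Dict.getD_of_not_contains _ _ (hg ▸ hc), add_assoc]
        · rw [(ih _ _ g).2]
          simp [List.filter_cons, hg, PySem.Dict.getD_insert,
            PySem.Dict.contains_insert, hg ▸ hc]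
      · refine ⟨?_, ?_⟩
        · rw [(ih _ _ g).1]
          simp [List.filter_cons, hg, Ne.symm hg, PySem.Dict.getD_insert]
        · rw [(ih _ _ g).2]
          simp [List.filter_cons, hg, Ne.symm hg, PySem.Dict.getD_insert,
            PySem.Dict.contains_insert]
    · simp only [hc, if_false]
      by_cases hg : PySem.List.pyGetD genres i "" = g
      · refine ⟨?_, ?_⟩
        · rw [(ih _ _ g).1]
          simp [List.filter_cons, hg, PySem.Dict.getD_insert, add_assoc]
        · rw [(ih _ _ g).2]
          simp only [Bool.not_eq_false] at hc
          simp [List.filter_cons, hg, PySem.Dict.contains_insert, hg ▸ hc]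
      · refine ⟨?_, ?_⟩
        · rw [(ih _ _ g).1]
          simp [List.filter_cons, hg, Ne.symm hg, PySem.Dict.getD_insert]
        · rw [(ih _ _ g).2]
          simp [List.filter_cons, hg, Ne.symm hg, PySem.Dict.contains_insert]

theorem selN_append_singleton (l : List String) (x g : String) :
    selN (l ++ [x]) g = selN l g ++ (if x = g then [l.length] else []) := by
  unfold selN
  rw [List.length_append, List.length_singleton, List.range_succ, List.filter_append]
  congr 1
  · apply List.filter_congr
    intro j hj
    rw [List.mem_range] at hj
    rw [List.getD_append _ _ _ _ hj]
  · have hx : (l ++ [x]).getD l.length "" = x := by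
      rw [List.getD_eq_getElem?_getD, List.getElem?_append_right le_rfl]
      simp
    by_cases h : x = g
    · simp [hx, h]
    · simp [hx, h]

theorem mem_iff_selN_ne_nil (l : List String) (g : String) :
    g ∈ l ↔ selN l g ≠ [] := by
  unfold selN
  rw [Ne, List.filter_eq_nil_iff]
  constructor
  · intro hg h
    obtain ⟨j, hj, hgj⟩ := List.mem_iff_getElem.mp hg
    exact h j (List.mem_range.mpr hj) (by simp [List.getElem?_eq_getElem hj, hgj])
  · intro h
    by_contra hg
    apply h
    intro j hj
    rw [List.mem_range] at hj
    simp only [List.getD_eq_getElem l "" hj, beq_iff_eq]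

    intro he
    exact hg (he ▸ List.getElem_mem hj)

theorem Fg_lt_of_mem (l : List String) (g : String) (hg : g ∈ l) :
    Fg l g < (l.length : Int) := by
  rw [mem_iff_selN_ne_nil] at hg
  obtain ⟨j, js, hjs⟩ := List.exists_cons_of_ne_nil hg
  have hj : j ∈ selN l g := hjs ▸ List.mem_cons_self
  have : j < l.length := by
    have := List.mem_of_mem_filter hj
    simpa [List.mem_range] using this
  simp only [Fg, hjs, List.map_cons, List.headD_cons]
  exact_mod_cast this

theorem Fg_append_of_mem (l : List String) (x g : String) (hg : g ∈ l) :
    Fg (l ++ [x]) g = Fg l g := by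
  rw [mem_iff_selN_ne_nil] at hg
  obtain ⟨j, js, hjs⟩ := List.exists_cons_of_ne_nil hg
  simp [Fg, selN_append_singleton, hjs]

theorem Fg_append_new (l : List String) (x : String) (hx : x ∉ l) :
    Fg (l ++ [x]) x = (l.length : Int) := by
  have hsel : selN l x = [] := by
    by_contra h
    exact hx ((mem_iff_selN_ne_nil l x).mpr h)
  simp [Fg, selN_append_singleton, hsel]

-- first-occurrence ordering of dedup
theorem dedup_pairwise_Fg (genres : List String) :
    (PySem.List.dedup genres).Pairwise (fun a b => Fg genres a < Fg genres b) := by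
  induction genres using List.reverseRecOn with
  | nil => simp
  | append_singleton l x ih =>
    rw [PySem.List.dedup_eq_ofList, PySem.Set.ofList_append_singleton]
    rw [PySem.List.dedup_eq_ofList] at ih
    by_cases hx : x ∈ l
    · rw [PySem.Set.add_of_mem ((PySem.Set.mem_ofList _ _).mpr hx)]
      refine ih.imp_of_mem ?_
      intro a b ha hb hab
      rw [Fg_append_of_mem l x a ((PySem.Set.mem_ofList _ _).mp ha),
        Fg_append_of_mem l x b ((PySem.Set.mem_ofList _ _).mp hb)]
      exact hab
    · rw [PySem.Set.add_of_not_mem (fun h => hx ((PySem.Set.mem_ofList _ _).mp h))]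
      rw [List.pairwise_append]
      refine ⟨ih.imp_of_mem ?_, by simp, ?_⟩
      · intro a b ha hb hab
        rw [Fg_append_of_mem l x a ((PySem.Set.mem_ofList _ _).mp ha),
          Fg_append_of_mem l x b ((PySem.Set.mem_ofList _ _).mp hb)]
        exact hab
      · intro a ha b hb
        rw [List.mem_singleton] at hb
        rw [hb]
        rw [Fg_append_of_mem l x a ((PySem.Set.mem_ofList _ _).mp ha), Fg_append_new l x hx]
        exact Fg_lt_of_mem l a ((PySem.Set.mem_ofList _ _).mp ha)

theorem sum_ite_nodup (c : Nat) (g0 : String) :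
    ∀ (G : List String), G.Nodup →
    (G.map (fun g => if g0 = g then c else 0)).sum = if g0 ∈ G then c else 0 := by
  intro G
  induction G with
  | nil => simp
  | cons h t ih =>
    intro hnd
    rw [List.nodup_cons] at hnd
    rw [List.map_cons, List.sum_cons, ih hnd.2]
    by_cases hg : g0 = h
    · subst hg
      simp [hnd.1]
    · simp [hg, Ne.symm hg]

-- partition permutation
theorem flat_sel_perm (genres : List String) :
    ((PySem.List.dedup genres).flatMap (fun g => selN genres g)).Perm (List.range genres.length) := by
  rw [List.perm_iff_count]
  intro j
  rw [List.count_flatMap]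
  have hcount : ∀ g ∈ PySem.List.dedup genres, (List.count j ∘ selN genres) g
      = if genres.getD j "" = g then List.count j (List.range genres.length) else 0 := by
    intro g _
    simp only [Function.comp_apply, selN]
    by_cases hp : genres.getD j "" = g
    · rw [if_pos hp, List.count_filter (by simpa using hp)]
    · rw [if_neg hp, List.count_eq_zero]
      intro hmem
      exact hp (by simpa using (List.mem_filter.mp hmem).2)
  rw [List.map_congr_left hcount,
    sum_ite_nodup _ _ _ (by rw [PySem.List.dedup_eq_ofList]; exact PySem.Set.nodup_ofList genres)]
  by_cases hj : j < genres.length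
  · have hmem : genres.getD j "" ∈ genres := by
      rw [List.getD_eq_getElem genres "" hj]
      exact List.getElem_mem hj
    rw [if_pos (by rw [PySem.List.dedup_eq_ofList]; exact (PySem.Set.mem_ofList _ _).mpr hmem)]
  · have hz : List.count j (List.range genres.length) = 0 := by
      simp [List.count_range, hj]
    simp [hz]

theorem bCount_block (genres : List String) :
    ∀ (is : List Int) (g : String) (acc : List Int) (cnt : PySem.Dict String Int),
    (∀ i ∈ is, PySem.List.pyGetD genres i "" = g) →
    ((is.foldl (bCount genres) (acc, cnt)).1 = acc ++ is.take (2 - cnt.getD g 0).toNat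
      ∧ ∀ g', g' ≠ g → ((is.foldl (bCount genres) (acc, cnt)).2.contains g' = cnt.contains g'
        ∧ (is.foldl (bCount genres) (acc, cnt)).2.getD g' 0 = cnt.getD g' 0)) := by
  intro is
  induction is with
  | nil => intro g acc cnt _; simp
  | cons i is ih =>
    intro g acc cnt h
    have hgi : PySem.List.pyGetD genres i "" = g := h i List.mem_cons_self
    rw [List.foldl_cons]
    simp only [bCount, hgi]
    by_cases hc : cnt.getD g 0 < 2
    · simp only [hc, if_true]
      obtain ⟨ih1, ih2⟩ := ih g (acc ++ [i]) (cnt.insert g (cnt.getD g 0 + 1))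
        (fun i' hi' => h i' (List.mem_cons_of_mem _ hi'))
      refine ⟨?_, ?_⟩
      · rw [ih1, PySem.Dict.getD_insert_self]
        have htake : (2 - cnt.getD g 0).toNat = (2 - (cnt.getD g 0 + 1)).toNat + 1 := by omega
        rw [htake, List.take_succ_cons]
        simp
      · intro g' hg'
        obtain ⟨h1, h2⟩ := ih2 g' hg'
        rw [h1, h2, PySem.Dict.contains_insert, PySem.Dict.getD_insert]
        simp [hg']
    · simp only [hc, if_false]
      obtain ⟨ih1, ih2⟩ := ih g acc cnt (fun i' hi' => h i' (List.mem_cons_of_mem _ hi'))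
      refine ⟨?_, ih2⟩
      rw [ih1]
      have htake : (2 - cnt.getD g 0).toNat = 0 := by omega
      simp [htake]

-- counting pass over genre-blocks
theorem bCount_blocks (genres : List String) :
    ∀ (blocks : List (String × List Int)) (acc : List Int) (cnt : PySem.Dict String Int),
    blocks.Pairwise (fun x y => x.1 ≠ y.1) →
    (∀ b ∈ blocks, cnt.contains b.1 = false) →
    (∀ b ∈ blocks, ∀ i ∈ b.2, PySem.List.pyGetD genres i "" = b.1) →
    ((blocks.flatMap (fun b => b.2)).foldl (bCount genres) (acc, cnt)).1
      = acc ++ blocks.flatMap (fun b => b.2.take 2) := by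
  intro blocks
  induction blocks with
  | nil => intro acc cnt _ _ _; simp
  | cons b bs ih =>
    intro acc cnt hpw hcnt hgen
    rw [List.flatMap_cons, List.foldl_append]
    obtain ⟨h1, h2⟩ := bCount_block genres b.2 b.1 acc cnt
      (fun i hi => hgen b List.mem_cons_self i hi)
    have hc0 : cnt.getD b.1 0 = 0 :=
      PySem.Dict.getD_of_not_contains _ _ (hcnt b List.mem_cons_self)
    rw [List.pairwise_cons] at hpw
    have hres := ih (b.2.foldl (bCount genres) (acc, cnt)).1
      (b.2.foldl (bCount genres) (acc, cnt)).2 hpw.2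
      (fun b' hb' => by
        rw [(h2 b'.1 (Ne.symm (hpw.1 b' hb'))).1]
        exact hcnt b' (List.mem_cons_of_mem _ hb'))
      (fun b' hb' => hgen b' (List.mem_cons_of_mem _ hb'))
    rw [Prod.mk.eta] at hres
    rw [hres, h1, hc0]
    simp [List.flatMap_cons, List.append_assoc]


def wSort (e : String × Int × List (Int × Int)) : List (Int × Int) :=
  PySem.List.sorted e.2.2 (fun x => [x.2, -x.1]) true

def aOut (e : String × Int × List (Int × Int)) : List Int :=
  ((wSort e).take 2).map (fun x => x.1)

theorem aPick_eq (ans : List Int) (e : String × Int × List (Int × Int)) :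
    aPick ans e = ans ++ aOut e := by
  unfold aPick aOut wSort
  cases h : PySem.List.sorted e.2.2 (fun x => [x.2, -x.1]) true with
  | nil => simp
  | cons a t =>
    cases t with
    | nil => simp
    | cons b t2 => simp

theorem pairwise_flatMap {α β : Type} (R : β → β → Prop) (f : α → List β) :
    ∀ (l : List α), l.Pairwise (fun a b => ∀ x ∈ f a, ∀ y ∈ f b, R x y) →
    (∀ a ∈ l, (f a).Pairwise R) → (l.flatMap f).Pairwise R := by
  intro l
  induction l with
  | nil => intro _ _; simp
  | cons a l ih =>
    intro hpw hin
    rw [List.pairwise_cons] at hpw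
    rw [List.flatMap_cons, List.pairwise_append]
    refine ⟨hin a List.mem_cons_self, ih hpw.2 (fun a' ha' => hin a' (List.mem_cons_of_mem _ ha')), ?_⟩
    intro x hx y hy
    rw [List.mem_flatMap] at hy
    obtain ⟨b, hb, hyb⟩ := hy
    exact hpw.1 b hb x hx y hyb

theorem list4_lt (a b c d a' b' c' d' : Int)
    (h : a < a' ∨ (a = a' ∧ (b < b' ∨ (b = b' ∧ (c < c' ∨ (c = c' ∧ d < d')))))) :
    ([a, b, c, d] : List Int) < [a', b', c', d'] := by
  simp only [List.cons_lt_cons_iff]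
  tauto

theorem list2_lt_iff (p q p' q' : Int) :
    ([p, q] : List Int) < [p', q'] ↔ (p < p' ∨ (p = p' ∧ q < q')) := by
  simp [List.cons_lt_cons_iff]

theorem mem_Eg_facts (genres : List String) (plays : List Int) (g : String) :
    ∀ x ∈ Eg genres plays g,
      PySem.List.pyGetD genres x.1 "" = g ∧ PySem.List.pyGetD plays x.1 0 = x.2 := by
  intro x hx
  unfold Eg at hx
  rw [List.mem_map] at hx
  obtain ⟨j, hj, hxj⟩ := hx
  unfold selN at hj
  rw [List.mem_filter, List.mem_range] at hj
  subst hxj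
  refine ⟨?_, ?_⟩
  · simp only [PySem.List.pyGetD_natCast]
    exact beq_iff_eq.mp hj.2
  · simp only [PySem.List.pyGetD_natCast]

theorem Eg_fst_nodup (genres : List String) (plays : List Int) (g : String) :
    ((Eg genres plays g).map (fun x => x.1)).Nodup := by
  unfold Eg
  rw [List.map_map]
  have h1 : (selN genres g).Nodup := (List.nodup_range).filter _
  refine h1.map ?_
  intro a b hab
  simpa using hab

-- the two DecidableLT instances on List ℤ (core's and the LinearOrder's) decide the same order
theorem listint_dlt_eq :
    (fun (a b : List ℤ) => a.decidableLT b) = @LinearOrder.toDecidableLT (List ℤ) _ := by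
  funext a b
  exact Subsingleton.elim _ _

theorem solution_eq_alt (genres : List String) (plays : List Int) :
    solution genres plays = solution_alt genres plays := by
  simp only [solution, solution_alt]
  -- names for the two sides' ingredients
  have hitems := aFold_items genres plays
  set dic := (PySem.List.pyRange 0 (PySem.List.len genres)).foldl (aStep genres plays)
    PySem.Dict.empty with hdic
  set ls := PySem.List.sorted dic.items (fun x => x.2.1) true with hls
  set tf := (PySem.List.pyRange 0 (PySem.List.len genres)).foldl (bStep genres plays)
    (PySem.Dict.empty, PySem.Dict.empty) with htf
  -- B's dict lookups compute Tg and Fg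
  have hT : ∀ g, tf.1.getD g 0 = Tg genres plays g := by
    intro g
    rw [htf, (bFold_char genres plays _ PySem.Dict.empty PySem.Dict.empty g).1]
    rw [pyRange_filter_eq]
    simp [Tg, List.map_map, Function.comp_def, PySem.List.pyGetD_natCast, PySem.Dict.getD_empty]
  have hF : ∀ g, tf.2.getD g 0 = Fg genres g := by
    intro g
    rw [htf, (bFold_char genres plays _ PySem.Dict.empty PySem.Dict.empty g).2]
    rw [pyRange_filter_eq]
    simp [Fg, PySem.Dict.contains_empty, PySem.Dict.getD_empty]
  -- every element of ls is a canonical genre triple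
  have hshape : ∀ e ∈ ls, e.2.1 = Tg genres plays e.1 ∧ e.2.2 = Eg genres plays e.1
      ∧ e.1 ∈ PySem.List.dedup genres := by
    intro e he
    have : e ∈ dic.items := (PySem.List.sorted_perm _ _ _).mem_iff.mp he
    rw [hitems, List.mem_map] at this
    obtain ⟨g, hg, hge⟩ := this
    rw [← hge]
    exact ⟨rfl, rfl, hg⟩
  -- stable sort order on ls
  have hstab : ls.Pairwise (fun e e' => e'.2.1 < e.2.1 ∨
      (e.2.1 = e'.2.1 ∧ Fg genres e.1 < Fg genres e'.1)) := by
    refine sorted_rev_stable_pairwise dic.items (fun x => x.2.1)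
      (fun e e' => Fg genres e.1 < Fg genres e'.1) ?_
    rw [hitems, List.pairwise_map]
    exact dedup_pairwise_Fg genres
  -- A's answer as a flatMap
  have hA : ls.foldl aPick [] = ls.flatMap aOut := by
    rw [show aPick = (fun ans e => ans ++ aOut e) from funext fun a => funext fun e => aPick_eq a e]
    rw [PySem.List.foldl_append_eq_flatMap]
    simp
  -- facts about each block's inner sorted list
  have hw : ∀ e ∈ ls, (wSort e).Perm (Eg genres plays e.1)
      ∧ (wSort e).Pairwise (fun a b => ([b.2, -b.1] : List Int) < [a.2, -a.1]) := by
    intro e he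
    obtain ⟨-, h2, -⟩ := hshape e he
    constructor
    · rw [wSort, h2]
      exact PySem.List.sorted_perm _ _ _
    · have hle : (wSort e).Pairwise (fun a b => ([b.2, -b.1] : List Int) ≤ [a.2, -a.1]) := by
        rw [wSort, listint_dlt_eq]
        exact PySem.List.sorted_pairwise_rev _ _
      have hnd : ((wSort e).map (fun x => x.1)).Nodup := by
        have : (wSort e).Perm (Eg genres plays e.1) := by
          rw [wSort, h2]; exact PySem.List.sorted_perm _ _ _
        exact ((this.map _).nodup_iff).mpr (Eg_fst_nodup genres plays e.1)
      have hne : (wSort e).Pairwise (fun a b => a.1 ≠ b.1) := List.pairwise_map.mp hnd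
      refine (hle.and hne).imp ?_
      rintro a b ⟨h1, h2'⟩
      refine lt_of_le_of_ne h1 ?_
      intro hkey
      apply h2'
      have := List.cons.injEq .. ▸ hkey
      simp only [List.cons.injEq] at hkey
      omega
  -- the key of an element of block e
  have hkey : ∀ e ∈ ls, ∀ x ∈ wSort e,
      bKey genres plays tf.1 tf.2 x.1
        = [-(Tg genres plays e.1), Fg genres e.1, -x.2, x.1] := by
    intro e he x hx
    obtain ⟨-, h2, -⟩ := hshape e he
    have hxE : x ∈ Eg genres plays e.1 := ((hw e he).1.mem_iff).mp hx
    obtain ⟨hg, hp⟩ := mem_Eg_facts genres plays e.1 x hxE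
    simp only [bKey, hg, hp, hT, hF]
  -- B's sorted order equals the concatenation of A's blocks
  have horder : PySem.List.sorted (PySem.List.pyRange 0 (PySem.List.len genres))
      (bKey genres plays tf.1 tf.2) false
      = ls.flatMap (fun e => (wSort e).map (fun x => x.1)) := by
    rw [listint_dlt_eq]
    apply PySem.List.sorted_eq_of_perm_of_pairwise_lt
    · -- permutation
      have p1 : (ls.flatMap (fun e => (wSort e).map (fun x => x.1))).Perm
          (dic.items.flatMap (fun e => (Eg genres plays e.1).map (fun x => x.1))) := by
        refine List.Perm.flatMap (PySem.List.sorted_perm _ _ _) ?_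
        intro e he
        exact ((hw e he).1.map _)
      have p2 : (dic.items.flatMap (fun e => (Eg genres plays e.1).map (fun x => x.1))).Perm
          (PySem.List.pyRange 0 (PySem.List.len genres)) := by
        rw [hitems, List.flatMap_map]
        have : ∀ g : String, ((Eg genres plays g).map (fun x => x.1))
            = (selN genres g).map (fun (j : Nat) => (j : Int)) := by
          intro g
          simp [Eg, List.map_map, Function.comp_def]
        simp only [this]
        have : ((PySem.List.dedup genres).flatMap
              (fun g => (selN genres g).map (fun (j : Nat) => (j : Int))))
            = ((PySem.List.dedup genres).flatMap (fun g => selN genres g)).map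
              (fun (j : Nat) => (j : Int)) := by
          rw [List.map_flatMap]
        rw [this, show PySem.List.len genres = ((genres.length : Nat) : Int) by
          simp [PySem.List.len], PySem.List.pyRange_zero_nat]
        exact (flat_sel_perm genres).map _
      exact p1.trans p2
    · -- strict pairwise on the composite key
      refine pairwise_flatMap _ _ ls ?_ ?_
      · refine hstab.imp_of_mem ?_
        intro e e' he he' hS i hi i' hi'
        rw [List.mem_map] at hi hi'
        obtain ⟨x, hx, hxi⟩ := hi
        obtain ⟨y, hy, hyi⟩ := hi'
        subst hxi; subst hyi
        rw [hkey e he x hx, hkey e' he' y hy]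
        obtain ⟨hT1, -, -⟩ := hshape e he
        obtain ⟨hT1', -, -⟩ := hshape e' he'
        apply list4_lt
        rcases hS with h | ⟨h1, h2⟩
        · left
          rw [hT1, hT1'] at h
          omega
        · right
          rw [hT1, hT1'] at h1
          exact ⟨by rw [h1], Or.inl h2⟩
      · intro e he
        rw [List.pairwise_map]
        refine ((hw e he).2).imp_of_mem ?_
        intro x y hx hy hlt
        rw [hkey e he x hx, hkey e he y hy]
        apply list4_lt
        rw [list2_lt_iff] at hlt
        right
        refine ⟨rfl, Or.inr ⟨rfl, ?_⟩⟩
        omega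
  -- assemble: counting pass over the concatenated blocks
  rw [hA, horder]
  have hnodupg : (ls.map (fun e => e.1)).Nodup := by
    rw [((PySem.List.sorted_perm dic.items (fun x => x.2.1) true).map (fun e => e.1)).nodup_iff]
    rw [hitems, List.map_map]
    simpa [Function.comp_def] using PySem.List.nodup_dedup genres
  have hblocks := bCount_blocks genres
    (ls.map (fun e => (e.1, (wSort e).map (fun x => x.1)))) [] PySem.Dict.empty
    (by
      rw [List.pairwise_map]
      exact List.pairwise_map.mp hnodupg)
    (fun b _ => PySem.Dict.contains_empty b.1)
    (by
      intro b hb i hi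
      rw [List.mem_map] at hb
      obtain ⟨e, he, hbe⟩ := hb
      rw [← hbe] at hi ⊢
      rw [List.mem_map] at hi
      obtain ⟨x, hx, hxi⟩ := hi
      subst hxi
      have hxE : x ∈ Eg genres plays e.1 := ((hw e he).1.mem_iff).mp hx
      exact (mem_Eg_facts genres plays e.1 x hxE).1)
  rw [show ls.flatMap (fun e => (wSort e).map (fun x => x.1))
      = (ls.map (fun e => (e.1, (wSort e).map (fun x => x.1)))).flatMap (fun b => b.2) from by
        rw [List.flatMap_map]]
  rw [hblocks, List.flatMap_map]
  rw [show aOut = (fun e => ((wSort e).map (fun x => x.1)).take 2) from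
    funext fun e => by simp [aOut, List.map_take]]
  simp

-- ===== VERDICT (by name: the statement is the Claim_ definition above) =====
theorem solution_spec : Claim_equal_solution := by
  intro genres plays _ _
  show _ = _
  exact solution_eq_alt genres plays
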